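-- pv_equiv track=rewrite | github.com/sheilapaiva/LabProg1 | Unidade8/agrupa_multiplos/agrupa_multiplos.py | agrupa_multiplos
-- ===== SOURCE A (Python) =====
-- def agrupa_multiplos(seq, k):
-- 	ta_agrupado = True
-- 	while ta_agrupado  == True:
-- 		ta_agrupado = False
-- 		for i in range(len(seq) -1):
-- 			if seq[i] % k != 0 and seq[i + 1] % k == 0:
-- 				seq[i], seq[i + 1] = seq[i + 1], seq[i]
-- 				ta_agrupado = True
-- 				break
--
-- 	return seq
-- ===== SOURCE B (Python) =====
-- def agrupa_multiplos(seq, k):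
--     mult = []
--     rest = []
--     for x in seq:
--         if x % k == 0:
--             mult.append(x)
--         else:
--             rest.append(x)
--     return mult + rest
-- ===== Notes on version B (the rewrite author's own statement) =====
-- stated objective: faster
-- what changed: Replaced the repeated restart-and-swap bubble passes with a single-pass stable partition into two lists concatenated at the end.
-- outside the precondition, e.g. on agrupa_multiplos([5], 0): A returns [5], B raises ZeroDivisionError
import Mathlib
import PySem

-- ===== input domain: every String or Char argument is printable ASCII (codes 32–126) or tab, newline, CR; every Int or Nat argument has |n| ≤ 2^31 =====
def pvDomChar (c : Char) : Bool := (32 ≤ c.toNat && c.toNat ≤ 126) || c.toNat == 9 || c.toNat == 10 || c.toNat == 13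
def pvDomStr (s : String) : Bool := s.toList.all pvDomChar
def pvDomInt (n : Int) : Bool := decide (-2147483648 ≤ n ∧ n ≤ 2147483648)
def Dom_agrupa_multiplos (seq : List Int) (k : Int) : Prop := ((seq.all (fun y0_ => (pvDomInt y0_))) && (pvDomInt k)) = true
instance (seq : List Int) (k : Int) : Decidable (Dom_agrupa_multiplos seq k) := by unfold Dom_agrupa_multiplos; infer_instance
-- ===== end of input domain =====

-- B replaces A's repeated restart-and-swap passes by a single-pass stable partition (asymptotically faster).
-- Note: Python A sorts the list IN PLACE (caller-visible mutation); B does not mutate its argument — the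
-- equivalence proved here is about the RETURN value only.

-- ===== PORT A =====
-- A's inner for-loop: scan for the FIRST adjacent pair (non-multiple, multiple) and swap it ('break');
-- returns none when the pass finds no such pair (ta_agrupado stays False).
def pvOnePass (p : Int → Bool) : List Int → Option (List Int)
  | [] => none
  | [_] => none
  | a :: b :: rest =>
      if p a = false ∧ p b = true then some (b :: a :: rest)
      else (pvOnePass p (b :: rest)).map (a :: ·)

-- A's while-loop; the fuel only makes the same computation total (it is proved sufficient below).
def pvLoopA (p : Int → Bool) : Nat → List Int → List Int
  | 0, l => l
  | fuel + 1, l =>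
      match pvOnePass p l with
      | none => l
      | some l' => pvLoopA p fuel l'

def agrupa_multiplos (seq : List Int) (k : Int) : List Int :=
  pvLoopA (fun x => PySem.Int.mod x k == 0) (seq.length * seq.length + 1) seq

-- ===== PORT B =====
def agrupa_multiplos_alt (seq : List Int) (k : Int) : List Int :=
  let mr := seq.foldl
    (fun (mr : List Int × List Int) x =>
      if PySem.Int.mod x k == 0 then (mr.1 ++ [x], mr.2) else (mr.1, mr.2 ++ [x]))
    ([], [])
  mr.1 ++ mr.2

-- ===== PRECONDITION & SPEC =====
-- Pre_ excludes k = 0, on which Python's '%' raises ZeroDivisionError: A raises for every list of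
-- length ≥ 2 and returns only degenerately short lists untouched, and B raises there for any nonempty list.
def Pre_agrupa_multiplos (seq : List Int) (k : Int) : Prop := k ≠ 0
instance (seq : List Int) (k : Int) : Decidable (Pre_agrupa_multiplos seq k) := by
  unfold Pre_agrupa_multiplos; infer_instance
def pvWitness_agrupa_multiplos : List Int × Int := ([3, 4, 5, 6], 2)

def Spec_agrupa_multiplos (seq : List Int) (k : Int) (out : List Int) : Prop := out = agrupa_multiplos_alt seq k
instance (seq : List Int) (k : Int) (out : List Int) : Decidable (Spec_agrupa_multiplos seq k out) := by unfold Spec_agrupa_multiplos; infer_instance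

-- ===== CLAIM (what is proved, stated in full; the proofs are below) =====
def Claim_equal_agrupa_multiplos : Prop := ∀ (seq : List Int) (k : Int), Dom_agrupa_multiplos seq k → Pre_agrupa_multiplos seq k → Spec_agrupa_multiplos seq k (agrupa_multiplos seq k)

-- ===== LEMMAS AND PROOFS =====

-- inversion measure: pairs (i < j) with ¬p at i and p at j
def pvInv (p : Int → Bool) : List Int → Nat
  | [] => 0
  | a :: t => (if p a then 0 else t.countP p) + pvInv p t

lemma pvOnePass_none {p : Int → Bool} :
    ∀ {l : List Int}, pvOnePass p l = none → l = l.filter p ++ l.filter (fun x => !p x)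
  | [], _ => rfl
  | [a], _ => by
      by_cases h : p a = true <;> simp [List.filter, h]
  | a :: b :: rest, h => by
      rw [pvOnePass] at h
      by_cases hc : p a = false ∧ p b = true
      · simp [hc] at h
      · rw [if_neg hc, Option.map_eq_none_iff] at h
        have ih := pvOnePass_none (p := p) h
        by_cases ha : p a = true
        · simpa [List.filter, ha] using ih
        · have hb : p b = false := by
            rcases Bool.eq_false_or_eq_true (p b) with hb | hb
            · exact absurd ⟨by simpa using ha, hb⟩ hc
            · exact hb
          -- filter p (b :: rest) must be empty: its head would be b, with p b = false
          have hfp : (b :: rest).filter p = [] := by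
            rcases hfp : (b :: rest).filter p with _ | ⟨h0, t0⟩
            · rfl
            · have hh : p h0 = true := List.of_mem_filter (l := b :: rest) (by rw [hfp]; exact List.mem_cons_self)
              have : h0 = b := by
                have := ih
                rw [hfp] at this
                injection this with h1 _
                exact h1.symm
              rw [this] at hh; rw [hb] at hh; cases hh
          have : (b :: rest).filter (fun x => !p x) = b :: rest := by
            have := ih; rw [hfp] at this; simpa using this.symm
          have ha' : p a = false := by simpa using ha
          simp [ha', hfp, this]

lemma pvOnePass_some {p : Int → Bool} :
    ∀ {l l' : List Int}, pvOnePass p l = some l' →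
      l'.filter p = l.filter p ∧ l'.filter (fun x => !p x) = l.filter (fun x => !p x) ∧
        pvInv p l' + 1 = pvInv p l
  | [], _, h => by cases h
  | [a], _, h => by rw [pvOnePass] at h; cases h
  | a :: b :: rest, l', h => by
      rw [pvOnePass] at h
      by_cases hc : p a = false ∧ p b = true
      · rw [if_pos hc] at h
        cases h
        obtain ⟨ha, hb⟩ := hc
        refine ⟨by simp [List.filter, ha, hb], by simp [List.filter, ha, hb], ?_⟩
        have e1 : pvInv p (b :: a :: rest) = rest.countP p + pvInv p rest := by
          simp [pvInv, ha, hb]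
        have e2 : pvInv p (a :: b :: rest) = (rest.countP p + 1) + pvInv p rest := by
          simp [pvInv, ha, hb]
        omega
      · rw [if_neg hc] at h
        rcases Option.map_eq_some_iff.mp h with ⟨t', ht, rfl⟩
        obtain ⟨h1, h2, h3⟩ := pvOnePass_some (p := p) ht
        have hcnt : t'.countP p = (b :: rest).countP p := by
          rw [List.countP_eq_length_filter, List.countP_eq_length_filter, h1]
        refine ⟨?_, ?_, ?_⟩
        · by_cases ha : p a = true <;> simp [List.filter, ha, h1]
        · by_cases ha : p a = true <;> simp [List.filter, ha, h2]
        · have e1 : pvInv p (a :: t') = (if p a then 0 else (b :: rest).countP p) + pvInv p t' := by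
            rw [pvInv, hcnt]
          have e2 : pvInv p (a :: b :: rest)
              = (if p a then 0 else (b :: rest).countP p) + pvInv p (b :: rest) := by
            rw [pvInv]
          omega

lemma pvLoopA_eq {p : Int → Bool} :
    ∀ (fuel : Nat) (l : List Int), pvInv p l < fuel →
      pvLoopA p fuel l = l.filter p ++ l.filter (fun x => !p x)
  | 0, l, h => absurd h (by omega)
  | fuel + 1, l, h => by
      rw [pvLoopA]
      rcases ho : pvOnePass p l with _ | l'
      · exact pvOnePass_none ho
      · obtain ⟨h1, h2, h3⟩ := pvOnePass_some ho
        show pvLoopA p fuel l' = _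
        rw [pvLoopA_eq fuel l' (by omega), h1, h2]

lemma pvInv_le_sq (p : Int → Bool) : ∀ (l : List Int), pvInv p l ≤ l.length * l.length
  | [] => le_refl 0
  | a :: t => by
      have h1 : pvInv p t ≤ t.length * t.length := pvInv_le_sq p t
      have h2 : t.countP p ≤ t.length := List.countP_le_length
      simp only [pvInv, List.length_cons]
      have : (if p a then 0 else t.countP p) ≤ t.length := by split <;> omega
      nlinarith

lemma pvFold_partition (p : Int → Bool) :
    ∀ (l : List Int) (m r : List Int),
      l.foldl (fun (mr : List Int × List Int) x =>
        if p x then (mr.1 ++ [x], mr.2) else (mr.1, mr.2 ++ [x])) (m, r)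
      = (m ++ l.filter p, r ++ l.filter (fun x => !p x))
  | [], m, r => by simp
  | a :: t, m, r => by
      by_cases ha : p a = true <;>
        simp [List.foldl, List.filter, ha, pvFold_partition p t, List.append_assoc]

-- ===== VERDICT (by name: the statement is the Claim_ definition above) =====
theorem agrupa_multiplos_spec : Claim_equal_agrupa_multiplos := by
  intro seq k _ _
  unfold Spec_agrupa_multiplos agrupa_multiplos agrupa_multiplos_alt
  have hfuel : pvInv (fun x => PySem.Int.mod x k == 0) seq < seq.length * seq.length + 1 := by
    have := pvInv_le_sq (fun x => PySem.Int.mod x k == 0) seq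
    omega
  rw [pvLoopA_eq _ _ hfuel, pvFold_partition]
  simp
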